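-- pv_equiv track=rewrite | github.com/woeplanet/py-woeplanet-uri | woeplanet/utils/uri/__init__.py | id2path
-- ===== SOURCE A (Python) =====
-- def id2path(id):
--     tmp = str(id)
--     parts = []
--
--     while len(tmp) > 3:
--         parts.append(tmp[0:3])
--         tmp = tmp[3:]
--
--     if len(tmp):
--         parts.append(tmp)
--
--     return '/'.join(parts)
-- ===== SOURCE B (Python) =====
-- def id2path(id):
--     def chunk(s):
--         return s if len(s) <= 3 else s[:3] + '/' + chunk(s[3:])
--     return chunk(str(id))
-- ===== Notes on version B (the rewrite author's own statement) =====
-- stated objective: simpler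
-- what changed: Replaced the consuming while-loop that accumulates a parts list plus a trailing-remainder branch and a final join by a direct recursion that emits each three-char chunk and the separator as it goes.
import Mathlib
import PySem

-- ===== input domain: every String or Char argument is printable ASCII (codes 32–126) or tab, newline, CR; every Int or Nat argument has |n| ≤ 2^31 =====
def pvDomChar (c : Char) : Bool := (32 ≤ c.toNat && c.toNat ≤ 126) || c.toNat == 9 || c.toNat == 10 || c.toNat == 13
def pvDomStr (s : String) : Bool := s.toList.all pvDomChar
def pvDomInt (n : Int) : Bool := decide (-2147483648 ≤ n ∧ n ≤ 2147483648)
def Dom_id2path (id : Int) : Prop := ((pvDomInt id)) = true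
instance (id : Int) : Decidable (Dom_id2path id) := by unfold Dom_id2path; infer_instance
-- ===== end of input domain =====

-- B replaces A's consuming while-loop + parts list + trailing-if + join by a direct
-- recursion that emits each three-char chunk and the '/' separator as it goes (simpler).

-- ===== PORT A =====
-- the while loop of A: consumes tmp three chars at a time, appending tmp[0:3] to parts;
-- then the trailing 'if len(tmp): parts.append(tmp)'
def id2pathLoop (tmp : List Char) (parts : List (List Char)) : List (List Char) :=
  if tmp.length > 3 then
    id2pathLoop (PySem.List.slice tmp (some 3) none) (parts ++ [PySem.List.slice tmp (some 0) (some 3)])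
  else if tmp.length ≠ 0 then parts ++ [tmp] else parts
termination_by tmp.length
decreasing_by
  rw [show (3 : Int) = ((3 : Nat) : Int) from rfl, PySem.List.slice_from_natCast]
  simp; omega

def id2path (id : Int) : String :=
  String.ofList (PySem.Chars.join ['/'] (id2pathLoop (PySem.Int.toChars id) []))

-- ===== PORT B =====
-- Source B's 'chunk': s if len(s) <= 3 else s[:3] + '/' + chunk(s[3:])
def id2pathChunk (s : List Char) : List Char :=
  if s.length ≤ 3 then s
  else PySem.List.slice s none (some 3) ++ '/' :: id2pathChunk (PySem.List.slice s (some 3) none)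
termination_by s.length
decreasing_by
  rw [show (3 : Int) = ((3 : Nat) : Int) from rfl, PySem.List.slice_from_natCast]
  simp; omega

def id2path_alt (id : Int) : String :=
  String.ofList (id2pathChunk (PySem.Int.toChars id))

-- ===== PRECONDITION & SPEC =====
def Spec_id2path (id : Int) (out : String) : Prop := out = id2path_alt id
instance (id : Int) (out : String) : Decidable (Spec_id2path id out) := by unfold Spec_id2path; infer_instance

-- ===== CLAIM (what is proved, stated in full; the proofs are below) =====
def Claim_equal_id2path : Prop := ∀ (id : Int), Dom_id2path id → Spec_id2path id (id2path id)

-- ===== LEMMAS AND PROOFS =====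

-- the slices that occur are take/drop
theorem id2pathLoop_eq (tmp : List Char) (parts : List (List Char)) :
    id2pathLoop tmp parts =
      if tmp.length > 3 then id2pathLoop (tmp.drop 3) (parts ++ [tmp.take 3])
      else if tmp.length ≠ 0 then parts ++ [tmp] else parts := by
  rw [id2pathLoop]
  rw [show (3 : Int) = ((3 : Nat) : Int) from rfl, PySem.List.slice_from_natCast,
    PySem.List.slice_zero_start, PySem.List.slice_to_natCast]

theorem id2pathChunk_eq (s : List Char) :
    id2pathChunk s =
      if s.length ≤ 3 then s
      else s.take 3 ++ '/' :: id2pathChunk (s.drop 3) := by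
  rw [id2pathChunk]
  rw [show (3 : Int) = ((3 : Nat) : Int) from rfl, PySem.List.slice_from_natCast,
    PySem.List.slice_to_natCast]

-- the accumulator factors out
theorem id2pathLoop_acc (tmp : List Char) (parts : List (List Char)) :
    id2pathLoop tmp parts = parts ++ id2pathLoop tmp [] := by
  induction hn : tmp.length using Nat.strong_induction_on generalizing tmp parts with
  | _ n ih =>
    rw [id2pathLoop_eq, id2pathLoop_eq tmp []]
    split_ifs with h1 h2
    · rw [ih (tmp.drop 3).length (by simp; omega) (tmp.drop 3) (parts ++ [tmp.take 3]) rfl,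
        ih (tmp.drop 3).length (by simp; omega) (tmp.drop 3) ([] ++ [tmp.take 3]) rfl]
      simp
    · simp
    · simp

theorem id2pathLoop_ne_nil (tmp : List Char) (h : tmp ≠ []) : id2pathLoop tmp [] ≠ [] := by
  rw [id2pathLoop_eq]
  split_ifs with h1 h2
  · rw [id2pathLoop_acc]; simp
  · simp
  · exact absurd (List.length_eq_zero_iff.mp (by omega)) h

theorem join_id2pathLoop (tmp : List Char) :
    PySem.Chars.join ['/'] (id2pathLoop tmp []) = id2pathChunk tmp := by
  induction hn : tmp.length using Nat.strong_induction_on generalizing tmp with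
  | _ n ih =>
    by_cases h1 : tmp.length > 3
    · rw [id2pathLoop_eq]
      simp only [if_pos h1]
      rw [id2pathChunk_eq]
      simp only [if_neg (show ¬ tmp.length ≤ 3 by omega)]
      rw [id2pathLoop_acc]
      have hd : tmp.drop 3 ≠ [] := by
        intro hc; have := congrArg List.length hc; simp at this; omega
      obtain ⟨r, l, hrl⟩ := List.exists_cons_of_ne_nil (id2pathLoop_ne_nil _ hd)
      have hsh : [] ++ [tmp.take 3] ++ id2pathLoop (tmp.drop 3) [] = tmp.take 3 :: r :: l := by
        simp [hrl]
      rw [hsh, PySem.Chars.join_cons_cons, ← hrl,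
        ih (tmp.drop 3).length (by simp; omega) (tmp.drop 3) rfl]
      simp
    · rw [id2pathLoop_eq]
      simp only [if_neg h1]
      rw [id2pathChunk_eq]
      simp only [if_pos (show tmp.length ≤ 3 by omega)]
      by_cases h2 : tmp.length ≠ 0
      · simp only [if_pos h2]
        simp [PySem.Chars.join_singleton]
      · have : tmp = [] := List.length_eq_zero_iff.mp (by omega)
        simp [this, PySem.Chars.join_nil]

-- ===== VERDICT (by name: the statement is the Claim_ definition above) =====
theorem id2path_spec : Claim_equal_id2path := by
  intro id _
  unfold Spec_id2path id2path id2path_alt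
  rw [join_id2pathLoop]
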